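-- pv_equiv track=rewrite | github.com/jefflai333/message-parser-backend | Message_Stats.py | sent_most_msgs_per_day
-- ===== SOURCE A (Python) =====
-- def add_count_to_dict(key, dict):
--     if key in dict:
--         dict[key] += 1
--     else:
--         dict[key] = 1
--
-- def sent_most_msgs_per_day(date_stats):
--     max_msgs_per_day = dict()
--     max_person_count_per_day = dict()
--     # iterate through each date and find the max number of msgs sent on a particular day
--     for name in date_stats:
--         for dates in date_stats[name]:
--             if dates[0] not in max_msgs_per_day:
--                 max_msgs_per_day[dates[0]] = [name, dates[1]]
--             elif dates[1] > max_msgs_per_day[dates[0]][1]: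
--                 max_msgs_per_day[dates[0]] = [name, dates[1]]
--     # count the number of times each name appears in the dictionary to see who sent most msgs on a particular day
--     for key, value in max_msgs_per_day.items():
--         add_count_to_dict(value[0], max_person_count_per_day)
--     list = max_person_count_per_day.items()
--     list = sorted(list, key=lambda x: x[0])
--     return list
-- ===== SOURCE B (Python) =====
-- def sent_most_msgs_per_day(date_stats):
--     # Pass 1: group the per-date entries: date -> [(name, count), ...] in name-outer order.
--     date_index = {}
--     for name in date_stats:
--         for date, cnt in date_stats[name]:
--             date_index.setdefault(date, []).append((name, cnt))
--     # Pass 2: per date the winner is the first entry with maximal count (max keeps the first);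
--     # tally how many dates each winner has.
--     tally = {}
--     for entries in date_index.values():
--         winner = max(entries, key=lambda e: e[1])[0]
--         tally[winner] = tally.get(winner, 0) + 1
--     return sorted(tally.items(), key=lambda x: x[0])
-- ===== Notes on version B (the rewrite author's own statement) =====
-- stated objective: alternative
-- what changed: Instead of maintaining a running per-date maximum while scanning (A's online update dict), B first builds a date -> [(name, count)] index, then picks each date's winner with max(entries, key=count) (first maximal, matching A's first-wins tie-break), tallies winners, and sorts the tally by name.
import Mathlib
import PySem

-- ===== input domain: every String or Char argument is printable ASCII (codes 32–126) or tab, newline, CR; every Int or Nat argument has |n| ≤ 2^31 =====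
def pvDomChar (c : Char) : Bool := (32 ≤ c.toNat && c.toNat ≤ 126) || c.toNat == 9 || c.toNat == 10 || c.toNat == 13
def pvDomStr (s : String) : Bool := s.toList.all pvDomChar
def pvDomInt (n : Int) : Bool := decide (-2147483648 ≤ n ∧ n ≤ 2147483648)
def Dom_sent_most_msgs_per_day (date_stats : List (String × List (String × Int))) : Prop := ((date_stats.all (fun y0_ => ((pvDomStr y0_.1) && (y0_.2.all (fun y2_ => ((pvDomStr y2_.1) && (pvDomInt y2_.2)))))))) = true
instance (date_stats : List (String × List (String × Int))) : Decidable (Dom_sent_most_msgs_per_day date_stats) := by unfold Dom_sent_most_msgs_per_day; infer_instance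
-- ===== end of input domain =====

-- B replaces A's online running-maximum dict by a two-pass scheme: group entries per date,
-- pick each date's winner with max (first maximal element), tally, sort by name (objective: alternative).

-- ===== PORT A =====
-- add_count_to_dict: dict[key] += 1 if present, else dict[key] = 1
def pvAddCount (key : String) (d : PySem.Dict String Int) : PySem.Dict String Int :=
  if d.contains key then d.insert key (d.getD key 0 + 1) else d.insert key 1

def sent_most_msgs_per_day (date_stats : List (String × List (String × Int))) : List (String × Int) :=
  -- the argument is a Python dict: decode the association list as dict(date_stats)
  let ds := PySem.Dict.ofList date_stats
  -- for name in date_stats: for dates in date_stats[name]: …  (name = p.1; date_stats[name] is the dict lookup)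
  let mmpd := ds.items.foldl (fun acc p =>
      (ds.getD p.1 []).foldl (fun acc dates =>
        if acc.contains dates.1 = false then acc.insert dates.1 (p.1, dates.2)
        else if dates.2 > (acc.getD dates.1 ("", 0)).2 then acc.insert dates.1 (p.1, dates.2)
        else acc) acc) PySem.Dict.empty
  -- for key, value in max_msgs_per_day.items(): add_count_to_dict(value[0], …)
  let counts := mmpd.items.foldl (fun acc kv => pvAddCount kv.2.1 acc) PySem.Dict.empty
  PySem.List.sorted counts.items (fun x => x.1) false

-- ===== PORT B =====
-- winner of one date's entry list: max(entries, key=lambda e: e[1]) — first maximal element;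
-- Python max raises on [], but every grouped list is nonempty, so the default is never read.
def pvWin (l : List (String × Int)) : String × Int :=
  (PySem.List.max? l (fun e => e.2)).getD ("", 0)

def sent_most_msgs_per_day_alt (date_stats : List (String × List (String × Int))) : List (String × Int) :=
  -- the argument is a Python dict: decode the association list as dict(date_stats)
  let ds := PySem.Dict.ofList date_stats
  -- pass 1: date_index.setdefault(date, []).append((name, cnt))
  let dateIndex := ds.items.foldl (fun acc p =>
      p.2.foldl (fun acc e => acc.modify e.1 [] (fun l => l ++ [(p.1, e.2)])) acc) PySem.Dict.empty
  -- pass 2: tally[winner] = tally.get(winner, 0) + 1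
  let tally := dateIndex.values.foldl (fun acc entries =>
      acc.insert (pvWin entries).1 (acc.getD (pvWin entries).1 0 + 1)) PySem.Dict.empty
  PySem.List.sorted tally.items (fun x => x.1) false

-- ===== PRECONDITION & SPEC =====
def Spec_sent_most_msgs_per_day (date_stats : List (String × List (String × Int))) (out : List (String × Int)) : Prop := out = sent_most_msgs_per_day_alt date_stats
instance (date_stats : List (String × List (String × Int))) (out : List (String × Int)) : Decidable (Spec_sent_most_msgs_per_day date_stats out) := by unfold Spec_sent_most_msgs_per_day; infer_instance

-- ===== CLAIM (what is proved, stated in full; the proofs are below) =====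
def Claim_equal_sent_most_msgs_per_day : Prop := ∀ (date_stats : List (String × List (String × Int))), Dom_sent_most_msgs_per_day date_stats → Spec_sent_most_msgs_per_day date_stats (sent_most_msgs_per_day date_stats)

-- ===== LEMMAS AND PROOFS =====

-- A's per-entry update, over the flattened (date, (name, cnt)) stream
def stepA (d : PySem.Dict String (String × Int)) (x : String × String × Int) : PySem.Dict String (String × Int) :=
  if d.contains x.1 = false then d.insert x.1 x.2
  else if x.2.2 > (d.getD x.1 ("", 0)).2 then d.insert x.1 x.2
  else d

-- B's per-entry update, over the same stream
def stepB (d : PySem.Dict String (List (String × Int))) (x : String × String × Int) : PySem.Dict String (List (String × Int)) :=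
  d.modify x.1 [] (fun l => l ++ [x.2])

-- the simulation map: a group is represented by its winner
def pvG (q : String × List (String × Int)) : String × String × Int := (q.1, pvWin q.2)

lemma max?_append_singleton {α κ : Type} [LT κ] [DecidableLT κ] (l : List α) (v : α) (key : α → κ) :
    PySem.List.max? (l ++ [v]) key =
      match PySem.List.max? l key with
      | none => some v
      | some m => if key m < key v then some v else some m := by
  simp only [PySem.List.max?, List.foldl_append, List.foldl_cons, List.foldl_nil]
  generalize List.foldl _ (none : Option α) l = o
  cases o <;> rfl

lemma pvWin_singleton (v : String × Int) : pvWin [v] = v := by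
  simp [pvWin, PySem.List.max?]

lemma pvWin_append (l : List (String × Int)) (v : String × Int) (h : l ≠ []) :
    pvWin (l ++ [v]) = if v.2 > (pvWin l).2 then v else pvWin l := by
  obtain ⟨m, hm⟩ : ∃ m, PySem.List.max? l (fun e => e.2) = some m := by
    rcases hx : PySem.List.max? l (fun e => e.2) with _ | m
    · exact absurd ((PySem.List.max?_eq_none_iff l _).1 hx) h
    · exact ⟨m, rfl⟩
  simp only [pvWin, max?_append_singleton, hm, gt_iff_lt]
  by_cases h : m.2 < v.2 <;> simp [h]

lemma nodup_fst_eq {α β : Type} {l : List (α × β)} (h : (l.map Prod.fst).Nodup)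
    {p q : α × β} (hp : p ∈ l) (hq : q ∈ l) (hfst : p.1 = q.1) : p = q := by
  induction l with
  | nil => cases hp
  | cons a t ih =>
    simp only [List.map_cons, List.nodup_cons] at h
    rcases List.mem_cons.1 hp with rfl | hp' <;> rcases List.mem_cons.1 hq with rfl | hq'
    · rfl
    · exact absurd (hfst ▸ List.mem_map_of_mem hq') h.1
    · exact absurd (hfst ▸ List.mem_map_of_mem hp') h.1
    · exact ih h.2 hp' hq'

lemma contains_map_G (d2 : PySem.Dict String (List (String × Int))) (k : String) :
    (PySem.Dict.mk (d2.items.map pvG)).contains k = d2.contains k := by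
  show (d2.items.map pvG).any (fun p => p.1 == k) = _
  rw [List.any_map]; rfl

lemma keys_map_G (d2 : PySem.Dict String (List (String × Int))) :
    (PySem.Dict.mk (d2.items.map pvG)).keys = d2.keys := by
  simp [PySem.Dict.keys, List.map_map, pvG, Function.comp]

-- one step preserves the simulation
lemma step_rel (d2 : PySem.Dict String (List (String × Int)))
    (hne : ∀ q ∈ d2.items, q.2 ≠ []) (hnd : d2.keys.Nodup) (x : String × String × Int) :
    stepA (PySem.Dict.mk (d2.items.map pvG)) x = PySem.Dict.mk ((stepB d2 x).items.map pvG) := by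
  unfold stepA stepB PySem.Dict.modify
  rcases hc : d2.contains x.1 with _ | _
  · -- new date: both sides append
    rw [if_pos (show (PySem.Dict.mk (d2.items.map pvG)).contains x.1 = false by
      rw [contains_map_G]; exact hc)]
    apply PySem.Dict.ext
    rw [PySem.Dict.items_insert_of_not_contains _ _ (by rw [contains_map_G]; exact hc),
        PySem.Dict.items_insert_of_not_contains _ _ hc,
        PySem.Dict.getD_of_not_contains _ _ hc]
    simp [pvG, pvWin_singleton]
  · -- existing date: the stored group's winner is A's stored running maximum
    obtain ⟨q0, hq0mem, hq01⟩ : ∃ q0 ∈ d2.items, q0.1 = x.1 := by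
      have := hc
      unfold PySem.Dict.contains at this
      rcases List.any_eq_true.1 this with ⟨q0, hm, he⟩
      exact ⟨q0, hm, by simpa using he⟩
    have hq0mem' : (x.1, q0.2) ∈ d2.items := by rw [← hq01]; simpa using hq0mem
    have hgD2 : d2.getD x.1 [] = q0.2 := PySem.Dict.getD_of_mem_items d2 hq0mem' hnd []
    have hnd1 : (PySem.Dict.mk (d2.items.map pvG)).keys.Nodup := by rw [keys_map_G]; exact hnd
    have hmem1 : (x.1, pvWin q0.2) ∈ (PySem.Dict.mk (d2.items.map pvG)).items := by
      show _ ∈ d2.items.map pvG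
      exact hq01 ▸ List.mem_map_of_mem hq0mem
    have hgD1 : (PySem.Dict.mk (d2.items.map pvG)).getD x.1 ("", 0) = pvWin q0.2 :=
      PySem.Dict.getD_of_mem_items _ hmem1 hnd1 _
    have hne0 : q0.2 ≠ [] := hne q0 hq0mem
    have hcon1 : (PySem.Dict.mk (d2.items.map pvG)).contains x.1 = true := by
      rw [contains_map_G]; exact hc
    rw [if_neg (by rw [hcon1]; simp), hgD1, hgD2]
    have hkey : ∀ p ∈ d2.items, p.1 = x.1 → p = q0 := by
      intro p hp hp1
      exact nodup_fst_eq hnd hp hq0mem (by rw [hp1, hq01])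
    by_cases ht : x.2.2 > (pvWin q0.2).2
    · rw [if_pos ht]
      apply PySem.Dict.ext
      rw [PySem.Dict.items_insert_of_contains _ _ hcon1,
          PySem.Dict.items_insert_of_contains _ _ hc]
      show (d2.items.map pvG).map _ = (d2.items.map _).map pvG
      rw [List.map_map, List.map_map]
      apply List.map_congr_left
      intro p hp
      by_cases hp1 : p.1 = x.1
      · have : p = q0 := hkey p hp hp1
        subst this
        simp only [Function.comp, pvG, hq01, beq_self_eq_true, if_true]
        rw [pvWin_append _ _ hne0, if_pos ht]
      · simp only [Function.comp, pvG]
        rw [if_neg (by simpa using hp1), if_neg (by simpa using hp1)]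
    · rw [if_neg ht]
      apply PySem.Dict.ext
      rw [PySem.Dict.items_insert_of_contains _ _ hc]
      show d2.items.map pvG = (d2.items.map _).map pvG
      rw [List.map_map]
      apply List.map_congr_left
      intro p hp
      by_cases hp1 : p.1 = x.1
      · have : p = q0 := hkey p hp hp1
        subst this
        simp only [Function.comp, pvG, hq01, beq_self_eq_true, if_true]
        rw [pvWin_append _ _ hne0, if_neg ht]
      · simp only [Function.comp, pvG]
        rw [if_neg (by simpa using hp1)]

lemma stepB_ne (d2 : PySem.Dict String (List (String × Int)))
    (hne : ∀ q ∈ d2.items, q.2 ≠ []) (x : String × String × Int) :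
    ∀ q ∈ (stepB d2 x).items, q.2 ≠ [] := by
  intro q hq
  unfold stepB PySem.Dict.modify at hq
  rcases hc : d2.contains x.1 with _ | _
  · rw [PySem.Dict.items_insert_of_not_contains _ _ hc] at hq
    rcases List.mem_append.1 hq with h | h
    · exact hne q h
    · simp only [List.mem_singleton] at h
      subst h; simp
  · rw [PySem.Dict.items_insert_of_contains _ _ hc] at hq
    rcases List.mem_map.1 hq with ⟨p, hp, rfl⟩
    by_cases h : (p.1 == x.1) = true
    · simp [h]
    · simp only [h]
      exact hne p hp

lemma stepB_nodup (d2 : PySem.Dict String (List (String × Int)))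
    (hnd : d2.keys.Nodup) (x : String × String × Int) : (stepB d2 x).keys.Nodup := by
  unfold stepB PySem.Dict.modify
  exact PySem.Dict.nodup_keys_insert _ _ _ hnd

-- the whole flattened loop preserves the simulation
lemma loop_rel (L : List (String × String × Int)) :
    ∀ (d2 : PySem.Dict String (List (String × Int))),
      (∀ q ∈ d2.items, q.2 ≠ []) → d2.keys.Nodup →
      L.foldl stepA (PySem.Dict.mk (d2.items.map pvG)) = PySem.Dict.mk ((L.foldl stepB d2).items.map pvG) := by
  induction L with
  | nil => intro d2 _ _; rfl
  | cons x t ih =>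
    intro d2 hne hnd
    simp only [List.foldl_cons, step_rel d2 hne hnd x]
    exact ih (stepB d2 x) (stepB_ne d2 hne x) (stepB_nodup d2 hnd x)

-- a 'for p in pairs: for e in p.2: step(acc, (e.1, p.1, e.2))' double loop is the flat loop
lemma foldl2_flat {σ : Type} (pairs : List (String × List (String × Int)))
    (step : σ → String × String × Int → σ) (init : σ) :
    pairs.foldl (fun acc p => p.2.foldl (fun acc e => step acc (e.1, p.1, e.2)) acc) init
      = (pairs.flatMap (fun p => p.2.map (fun e => (e.1, p.1, e.2)))).foldl step init := by
  induction pairs generalizing init with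
  | nil => rfl
  | cons p t ih =>
    simp only [List.foldl_cons, List.flatMap_cons, List.foldl_append]
    rw [List.foldl_map]
    exact ih _

lemma pvAddCount_eq (k : String) (d : PySem.Dict String Int) :
    pvAddCount k d = d.insert k (d.getD k 0 + 1) := by
  unfold pvAddCount
  rcases hc : d.contains k with _ | _
  · simp [PySem.Dict.getD_of_not_contains d 0 hc]
  · simp

-- the two counting dicts coincide (stated with the ports' exact loop bodies)
lemma dicts_eq (pairs : List (String × List (String × Int))) :
    ((pairs.foldl (fun acc p => p.2.foldl (fun acc dates =>
        if acc.contains dates.1 = false then acc.insert dates.1 (p.1, dates.2)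
        else if dates.2 > (acc.getD dates.1 ("", 0)).2 then acc.insert dates.1 (p.1, dates.2)
        else acc) acc) PySem.Dict.empty).items.foldl
      (fun acc kv => pvAddCount kv.2.1 acc) PySem.Dict.empty)
  = ((pairs.foldl (fun acc p => p.2.foldl (fun acc e =>
        PySem.Dict.modify acc e.1 [] (fun l => l ++ [(p.1, e.2)])) acc) PySem.Dict.empty).values.foldl
      (fun acc entries => acc.insert (pvWin entries).1 (acc.getD (pvWin entries).1 0 + 1)) PySem.Dict.empty) := by
  have hA : (pairs.foldl (fun acc p => p.2.foldl (fun acc dates =>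
        if acc.contains dates.1 = false then acc.insert dates.1 (p.1, dates.2)
        else if dates.2 > (acc.getD dates.1 ("", 0)).2 then acc.insert dates.1 (p.1, dates.2)
        else acc) acc) PySem.Dict.empty)
      = (pairs.flatMap (fun p => p.2.map (fun e => (e.1, p.1, e.2)))).foldl stepA PySem.Dict.empty :=
    foldl2_flat pairs stepA PySem.Dict.empty
  have hB : (pairs.foldl (fun acc p => p.2.foldl (fun acc e =>
        PySem.Dict.modify acc e.1 [] (fun l => l ++ [(p.1, e.2)])) acc) PySem.Dict.empty)
      = (pairs.flatMap (fun p => p.2.map (fun e => (e.1, p.1, e.2)))).foldl stepB PySem.Dict.empty :=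
    foldl2_flat pairs stepB PySem.Dict.empty
  rw [hA, hB]
  have hrel := loop_rel (pairs.flatMap (fun p => p.2.map (fun e => (e.1, p.1, e.2))))
    PySem.Dict.empty (by intro q hq; cases hq) (by simp [PySem.Dict.empty, PySem.Dict.keys])
  rw [show (PySem.Dict.empty : PySem.Dict String (String × Int))
      = PySem.Dict.mk ((PySem.Dict.empty : PySem.Dict String (List (String × Int))).items.map pvG) from rfl,
    hrel]
  generalize (pairs.flatMap (fun p => p.2.map (fun e => (e.1, p.1, e.2)))).foldl stepB PySem.Dict.empty = D
  show (D.items.map pvG).foldl (fun acc kv => pvAddCount kv.2.1 acc) PySem.Dict.empty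
      = (D.items.map (fun q => q.2)).foldl
          (fun acc entries => acc.insert (pvWin entries).1 (acc.getD (pvWin entries).1 0 + 1)) PySem.Dict.empty
  rw [List.foldl_map, List.foldl_map]
  apply PySem.List.foldl_congr_mem
  intro acc q _
  exact pvAddCount_eq (pvWin q.2).1 acc

-- ===== VERDICT (by name: the statement is the Claim_ definition above) =====
theorem sent_most_msgs_per_day_spec : Claim_equal_sent_most_msgs_per_day := by
  intro ds0 _
  unfold Spec_sent_most_msgs_per_day sent_most_msgs_per_day sent_most_msgs_per_day_alt
  dsimp only
  have hlook : (PySem.Dict.ofList ds0).items.foldl (fun acc p =>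
        ((PySem.Dict.ofList ds0).getD p.1 []).foldl (fun acc dates =>
          if acc.contains dates.1 = false then acc.insert dates.1 (p.1, dates.2)
          else if dates.2 > (acc.getD dates.1 ("", 0)).2 then acc.insert dates.1 (p.1, dates.2)
          else acc) acc) PySem.Dict.empty
      = (PySem.Dict.ofList ds0).items.foldl (fun acc p =>
        p.2.foldl (fun acc dates =>
          if acc.contains dates.1 = false then acc.insert dates.1 (p.1, dates.2)
          else if dates.2 > (acc.getD dates.1 ("", 0)).2 then acc.insert dates.1 (p.1, dates.2)
          else acc) acc) PySem.Dict.empty := by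
    apply PySem.List.foldl_congr_mem
    intro acc p hp
    rw [PySem.Dict.getD_of_mem_items (PySem.Dict.ofList ds0) (by simpa using hp)
        (PySem.Dict.nodup_keys_ofList ds0) []]
  rw [hlook]
  exact congrArg (fun d : PySem.Dict String Int =>
    PySem.List.sorted d.items (fun x => x.1) false) (dicts_eq (PySem.Dict.ofList ds0).items)
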